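-- pv_equiv track=rewrite | github.com/barbarian21/ats-web | Apps/stationTrack/datadeal.py | calAStrWidth
-- ===== SOURCE A (Python) =====
-- def calAStrWidth(tempStr, minWidth = 0):
--     width = minWidth
--     if isinstance(tempStr, str):
--         strList = tempStr.split('\n')
--         for aSlice in strList:
--             if width < len(aSlice):
--                 width = len(aSlice)
--     return width
-- ===== SOURCE B (Python) =====
-- def calAStrWidth(tempStr, minWidth = 0):
--     # One pass over the characters: count the current line's length, and at each
--     # line boundary ('\n' or end of string) take the max with the width so far.
--     width = minWidth
--     if isinstance(tempStr, str):
--         cur = 0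
--         for ch in tempStr:
--             if ch == '\n':
--                 if cur > width:
--                     width = cur
--                 cur = 0
--             else:
--                 cur += 1
--         if cur > width:
--             width = cur
--     return width
-- ===== Notes on version B (the rewrite author's own statement) =====
-- stated objective: alternative
-- what changed: Instead of materialising the list of newline-split substrings and folding over their lengths, B makes a single character pass keeping a running counter of the current line's length and updating the maximum at each line boundary, allocating no substrings.
import Mathlib
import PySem

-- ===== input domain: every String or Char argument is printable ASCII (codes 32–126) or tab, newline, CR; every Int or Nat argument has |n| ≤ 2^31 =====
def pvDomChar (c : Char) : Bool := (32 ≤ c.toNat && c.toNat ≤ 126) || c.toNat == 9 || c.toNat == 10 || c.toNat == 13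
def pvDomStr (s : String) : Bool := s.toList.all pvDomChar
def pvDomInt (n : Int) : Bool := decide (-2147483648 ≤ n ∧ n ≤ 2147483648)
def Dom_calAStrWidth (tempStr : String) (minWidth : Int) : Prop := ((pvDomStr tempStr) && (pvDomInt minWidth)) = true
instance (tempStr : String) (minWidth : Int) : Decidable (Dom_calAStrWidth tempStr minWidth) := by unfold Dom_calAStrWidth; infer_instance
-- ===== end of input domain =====

-- B replaces split-then-fold by a single character pass with a running line-length counter (alternative decomposition; return value only).


-- ===== PORT A =====
-- isinstance(tempStr, str) is always true under the type convention; '\n' is a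
-- non-empty separator, so tempStr.split('\n') is PySem.Chars.splitOn (the sep ≠ "" form).
def calAStrWidth (tempStr : String) (minWidth : Int) : Int :=
  let strList := PySem.Chars.splitOn tempStr.toList "\n".toList
  strList.foldl
    (fun width aSlice =>
      if width < PySem.Chars.len aSlice then PySem.Chars.len aSlice else width)
    minWidth

-- ===== PORT B =====
def calAStrWidthAltGo : List Char → Int → Nat → Int
  | [], width, cur => if (cur : Int) > width then (cur : Int) else width
  | ch :: rest, width, cur =>
    if ch = '\n' then
      calAStrWidthAltGo rest (if (cur : Int) > width then (cur : Int) else width) 0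
    else
      calAStrWidthAltGo rest width (cur + 1)

def calAStrWidth_alt (tempStr : String) (minWidth : Int) : Int :=
  calAStrWidthAltGo tempStr.toList minWidth 0

-- ===== PRECONDITION & SPEC =====
def Spec_calAStrWidth (tempStr : String) (minWidth : Int) (out : Int) : Prop := out = calAStrWidth_alt tempStr minWidth
instance (tempStr : String) (minWidth : Int) (out : Int) : Decidable (Spec_calAStrWidth tempStr minWidth out) := by unfold Spec_calAStrWidth; infer_instance

-- ===== CLAIM (what is proved, stated in full; the proofs are below) =====
def Claim_equal_calAStrWidth : Prop := ∀ (tempStr : String) (minWidth : Int), Dom_calAStrWidth tempStr minWidth → Spec_calAStrWidth tempStr minWidth (calAStrWidth tempStr minWidth)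

-- ===== LEMMAS AND PROOFS =====

-- structural characterisation of splitting on '\n'
def pvLinesAux (cur : List Char) : List Char → List (List Char)
  | [] => [cur.reverse]
  | c :: rest => if c = '\n' then cur.reverse :: pvLinesAux [] rest else pvLinesAux (c :: cur) rest

theorem splitOn_go_eq (fuel : Nat) :
    ∀ (l cur : List Char) (acc : List (List Char)), l.length < fuel →
      PySem.Chars.splitOn.go ['\n'] fuel l cur acc = acc.reverse ++ pvLinesAux cur l := by
  induction fuel with
  | zero => intro l cur acc h; omega
  | succ fuel ih =>
    intro l cur acc h
    cases l with
    | nil => simp [PySem.Chars.splitOn.go, pvLinesAux]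
    | cons c rest =>
      simp only [PySem.Chars.splitOn.go, List.isPrefixOf, pvLinesAux]
      by_cases hc : c = '\n'
      · subst hc
        simp only [List.length_cons] at h
        simp [List.isPrefixOf, ih rest [] (cur.reverse :: acc) (by omega)]
      · have hc' : ¬('\n' = c) := fun h => hc h.symm
        simp only [List.length_cons] at h
        simp [hc, hc', ih rest (c :: cur) acc (by omega)]

theorem splitOn_eq_linesAux (s : List Char) :
    PySem.Chars.splitOn s ['\n'] = pvLinesAux [] s := by
  have := splitOn_go_eq (s.length + 1) s [] [] (by omega)
  simpa [PySem.Chars.splitOn] using this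

theorem altGo_eq_fold (l : List Char) :
    ∀ (cur : List Char) (w : Int),
      calAStrWidthAltGo l w cur.length =
        (pvLinesAux cur l).foldl
          (fun width aSlice =>
            if width < PySem.Chars.len aSlice then PySem.Chars.len aSlice else width) w := by
  induction l with
  | nil =>
    intro cur w
    simp only [pvLinesAux, List.foldl, calAStrWidthAltGo, PySem.Chars.len, List.length_reverse]
    try (split_ifs <;> omega)
  | cons c rest ih =>
    intro cur w
    by_cases hc : c = '\n'
    · subst hc
      have hw : (if (cur.length : Int) > w then (cur.length : Int) else w)
          = (if w < PySem.Chars.len cur.reverse then PySem.Chars.len cur.reverse else w) := by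
        simp only [PySem.Chars.len, List.length_reverse]
        try (split_ifs <;> omega)
      simp only [pvLinesAux, if_pos rfl, List.foldl, calAStrWidthAltGo, hw]
      exact ih [] _
    · simp only [pvLinesAux, if_neg hc, calAStrWidthAltGo, if_neg hc]
      have : cur.length + 1 = (c :: cur).length := rfl
      rw [this, ih]

-- ===== VERDICT (by name: the statement is the Claim_ definition above) =====
theorem calAStrWidth_spec : Claim_equal_calAStrWidth := by
  intro tempStr minWidth _
  show calAStrWidth tempStr minWidth = calAStrWidth_alt tempStr minWidth
  unfold calAStrWidth calAStrWidth_alt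
  have hsep : "\n".toList = ['\n'] := rfl
  rw [hsep, splitOn_eq_linesAux]
  exact (altGo_eq_fold tempStr.toList [] minWidth).symm
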